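-- pv_equiv track=rewrite | github.com/Mo-Shakib/Competitive-Programming | BRACU/BRACU Beginners Long Contest 06 (Binary manipulation) [Batch-3]/C.py | solution
-- ===== SOURCE A (Python) =====
-- def pos_lsd(num):
--     x = bin(num)[2:]
--     return len(str(x))
--
-- def solution(arr):
--     my_dict = {}
--     result = 0
--
--     for i in arr:
--         idx = pos_lsd(i)
--         if idx not in my_dict:
--             my_dict[idx] = [i]
--         else: my_dict[idx] += [i]
--
--     for x in my_dict.values():
--         if len(x) > 1:
--             result += (len(x)*(len(x)-1)//2)
--
--     return result
-- ===== SOURCE B (Python) =====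
-- def solution(arr):
--     seen = {}
--     result = 0
--     for x in arr:
--         k = len(bin(x)[2:])
--         c = seen.get(k, 0)
--         result += c
--         seen[k] = c + 1
--     return result
-- ===== Notes on version B (the rewrite author's own statement) =====
-- stated objective: alternative
-- what changed: Replaces the dict-of-lists grouping plus a second pass summing c*(c-1)//2 with a single online pass that keeps only a count per bit-length key and adds the number of previously seen equal-key elements at each step.
import Mathlib
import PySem

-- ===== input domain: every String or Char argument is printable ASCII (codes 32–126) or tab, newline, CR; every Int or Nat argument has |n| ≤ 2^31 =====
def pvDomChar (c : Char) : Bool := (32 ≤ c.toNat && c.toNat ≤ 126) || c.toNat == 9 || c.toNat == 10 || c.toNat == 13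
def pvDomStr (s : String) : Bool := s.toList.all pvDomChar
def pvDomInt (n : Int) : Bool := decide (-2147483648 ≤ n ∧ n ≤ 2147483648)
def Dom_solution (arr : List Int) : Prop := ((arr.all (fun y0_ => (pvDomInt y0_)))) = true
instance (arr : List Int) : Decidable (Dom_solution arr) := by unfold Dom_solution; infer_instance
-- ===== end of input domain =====

-- B replaces A's dict-of-lists grouping and second c*(c-1)//2 pass by a single online pass
-- keeping only a per-key count and adding the number of previously seen equal-key elements.

-- ===== PORT A =====

-- hand-written model of Python's bin(): binary digits of a positive Nat, most significant first
def binDigits (n : Nat) : List Char :=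
  if h : n = 0 then [] else binDigits (n / 2) ++ [if n % 2 = 1 then '1' else '0']
  decreasing_by exact Nat.div_lt_self (Nat.pos_of_ne_zero h) (by omega)

-- bin(num): optional '-', then "0b", then the digits of |num| (0 prints as "0"); exact on all Int
def pyBin (num : Int) : List Char :=
  (if num < 0 then ['-'] else []) ++ '0' :: 'b' ::
    (if num.natAbs = 0 then ['0'] else binDigits num.natAbs)

def pos_lsd (num : Int) : Int :=
  ((PySem.List.slice (pyBin num) (some 2) none).length : Int)

def solution (arr : List Int) : Int :=
  let my_dict : PySem.Dict Int (List Int) :=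
    arr.foldl (fun d i =>
      let idx := pos_lsd i
      if d.contains idx = false then d.insert idx [i]
      else d.insert idx (d.getD idx [] ++ [i])) PySem.Dict.empty
  my_dict.values.foldl (fun result x =>
      if (x.length : Int) > 1 then
        result + PySem.Int.floordiv ((x.length : Int) * ((x.length : Int) - 1)) 2
      else result) 0

-- ===== PORT B =====

def solution_alt (arr : List Int) : Int :=
  (arr.foldl (fun (st : Int × PySem.Dict Int Int) x =>
      let k : Int := ((PySem.List.slice (pyBin x) (some 2) none).length : Int)
      let c := st.2.getD k 0
      (st.1 + c, st.2.insert k (c + 1))) (0, PySem.Dict.empty)).1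

-- ===== PRECONDITION & SPEC =====
def Spec_solution (arr : List Int) (out : Int) : Prop := out = solution_alt arr
instance (arr : List Int) (out : Int) : Decidable (Spec_solution arr out) := by unfold Spec_solution; infer_instance

-- ===== CLAIM (what is proved, stated in full; the proofs are below) =====
def Claim_equal_solution : Prop := ∀ (arr : List Int), Dom_solution arr → Spec_solution arr (solution arr)

-- ===== LEMMAS AND PROOFS =====

-- the canonical value both programs compute: sum over distinct keys of C(count, 2)
def pairSum (m : List Int) : Int :=
  m.toFinset.sum (fun c => ((m.count c).choose 2 : Int))

theorem pairSum_nil : pairSum [] = 0 := by simp [pairSum]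

theorem choose_two_succ (n : Nat) : ((n + 1).choose 2 : Int) = (n.choose 2 : Int) + n := by
  have : (n + 1).choose 2 = n.choose 1 + n.choose 2 := Nat.choose_succ_succ n 1
  simp [this, Nat.choose_one_right]; ring

theorem pairSum_append_singleton (m : List Int) (k : Int) :
    pairSum (m ++ [k]) = pairSum m + (m.count k : Int) := by
  by_cases hk : k ∈ m
  · have hset : (m ++ [k]).toFinset = m.toFinset := by
      ext c
      simp only [List.mem_toFinset, List.mem_append, List.mem_singleton]
      exact ⟨fun h => h.elim id (fun e => e ▸ hk), Or.inl⟩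
    have hmem : k ∈ m.toFinset := List.mem_toFinset.mpr hk
    unfold pairSum
    rw [hset,
        Finset.sum_eq_sum_diff_singleton_add hmem (fun c => (((m ++ [k]).count c).choose 2 : Int)),
        Finset.sum_eq_sum_diff_singleton_add hmem (fun c => ((m.count c).choose 2 : Int))]
    have hcongr : ∀ c ∈ m.toFinset \ {k},
        (((m ++ [k]).count c).choose 2 : Int) = ((m.count c).choose 2 : Int) := by
      intro c hc
      have hne : c ≠ k := by simp at hc; exact hc.2
      simp [List.count_append, Ne.symm hne]
    rw [Finset.sum_congr rfl hcongr]
    have : (m ++ [k]).count k = m.count k + 1 := by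
      simp [List.count_append]
    rw [this, choose_two_succ]; ring
  · have hset : (m ++ [k]).toFinset = insert k m.toFinset := by
      ext c; simp [List.mem_toFinset]
    have hnot : k ∉ m.toFinset := by simpa [List.mem_toFinset] using hk
    have hcnt0 : m.count k = 0 := List.count_eq_zero.mpr hk
    unfold pairSum
    rw [hset, Finset.sum_insert hnot]
    have hkk : (m ++ [k]).count k = 1 := by simp [List.count_append, hcnt0]
    have hcongr : ∀ c ∈ m.toFinset,
        (((m ++ [k]).count c).choose 2 : Int) = ((m.count c).choose 2 : Int) := by
      intro c hc
      have hne : c ≠ k := fun h => hnot (h ▸ hc)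
      simp [List.count_append, Ne.symm hne]
    rw [Finset.sum_congr rfl hcongr, hkk, hcnt0]
    simp

-- ===== A-side characterisation =====

-- A's loop body is the grouping "modify" pattern
theorem solution_step_eq :
    (fun (d : PySem.Dict Int (List Int)) i =>
      let idx := pos_lsd i
      if d.contains idx = false then d.insert idx [i]
      else d.insert idx (d.getD idx [] ++ [i]))
    = fun d i => d.modify (pos_lsd i) [] (fun v => v ++ [i]) := by
  funext d i
  by_cases h : d.contains (pos_lsd i) = false
  · simp [h, PySem.Dict.modify, PySem.Dict.getD_of_not_contains d _ h]
  · simp [h, PySem.Dict.modify]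

theorem solution_eq_pairSum (arr : List Int) :
    solution arr = pairSum (arr.map pos_lsd) := by
  unfold solution
  rw [solution_step_eq]
  have hfold :
      arr.foldl (fun d i => d.modify (pos_lsd i) [] (fun v => v ++ [i]))
        (PySem.Dict.empty : PySem.Dict Int (List Int))
      = (arr.map (fun x => (pos_lsd x, x))).foldl
          (fun d p => d.modify p.1 [] (fun v => v ++ [p.2])) PySem.Dict.empty := by
    rw [List.foldl_map]
  rw [hfold]
  set d := (arr.map (fun x => (pos_lsd x, x))).foldl
      (fun d p => d.modify p.1 [] (fun v => v ++ [p.2]))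
      (PySem.Dict.empty : PySem.Dict Int (List Int)) with hd
  show List.foldl (fun result x =>
      if (x.length : Int) > 1 then
        result + PySem.Int.floordiv ((x.length : Int) * ((x.length : Int) - 1)) 2
      else result) 0 d.values = pairSum (arr.map pos_lsd)
  have hkeys : d.keys = PySem.Set.ofList (arr.map pos_lsd) := by
    rw [hd, List.foldl_map, PySem.Dict.keys_foldl_modify_key arr pos_lsd []
      (fun _ x => fun v => v ++ [x]) PySem.Dict.empty, PySem.Dict.keys_empty]
    rfl
  have hnodup : d.keys.Nodup := by rw [hkeys]; exact PySem.Set.nodup_ofList _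
  have hgetD : ∀ c, d.getD c [] = arr.filter (fun x => pos_lsd x == c) := by
    intro c
    rw [hd, PySem.Dict.getD_foldl_modify_append, PySem.Dict.getD_empty]
    simp [List.filter_map, List.map_map, Function.comp_def]
  rw [PySem.Dict.values_eq_map_keys d hnodup []]
  have hif : (fun (result : Int) (x : List Int) =>
      if (x.length : Int) > 1 then
        result + PySem.Int.floordiv ((x.length : Int) * ((x.length : Int) - 1)) 2
      else result)
      = fun result x => result + ((x.length).choose 2 : Int) := by
    funext result x
    rcases x with _ | ⟨a, _ | ⟨b, t⟩⟩
    · simp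
    · simp
    · have hlen : 1 ≤ (a :: b :: t).length := by simp
      have h2 : (1 : Int) < ((a :: b :: t).length : Int) := by
        simp only [List.length_cons]; omega
      rw [if_pos h2]
      congr 1
      rw [show ((a :: b :: t).length : Int) * (((a :: b :: t).length : Int) - 1)
            = (((a :: b :: t).length * ((a :: b :: t).length - 1) : Nat) : Int) by
          rw [Nat.cast_mul, Nat.cast_sub hlen]; norm_num]
      rw [show (2 : Int) = ((2 : Nat) : Int) from rfl, PySem.Int.floordiv_natCast,
        Nat.choose_two_right]
  have hterm : ∀ c : Int, (((d.getD c []).length).choose 2 : Int)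
      = (((arr.map pos_lsd).count c).choose 2 : Int) := by
    intro c
    rw [hgetD c]
    congr 2
    rw [← List.countP_eq_length_filter, List.count, List.countP_map]
    rfl
  rw [hif, List.foldl_map, PySem.List.foldl_add]
  simp only [hterm]
  rw [← List.sum_toFinset _ hnodup]
  have hseteq : d.keys.toFinset = (arr.map pos_lsd).toFinset := by
    ext c
    rw [hkeys]
    simp [List.mem_toFinset, PySem.Set.mem_ofList]
  rw [hseteq]
  unfold pairSum
  simp

-- ===== B-side characterisation =====

-- the second component of B's fold only depends on the second component of the state
theorem foldl_pair_snd {α β γ : Type} (f : (β × γ) → α → β) (g : γ → α → γ)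
    (l : List α) (b : β) (c : γ) :
    (l.foldl (fun st x => (f st x, g st.2 x)) (b, c)).2 = l.foldl g c := by
  induction l generalizing b c with
  | nil => rfl
  | cons y t ih => simp [List.foldl_cons, ih]

theorem solution_alt_counter (l : List Int) :
    ((l.foldl (fun (st : Int × PySem.Dict Int Int) x =>
      let k : Int := ((PySem.List.slice (pyBin x) (some 2) none).length : Int)
      let c := st.2.getD k 0
      (st.1 + c, st.2.insert k (c + 1))) (0, PySem.Dict.empty)).2).getD v 0
    = ((l.map pos_lsd).count v : Int) := by
  have h := foldl_pair_snd
    (fun (st : Int × PySem.Dict Int Int) x => st.1 + st.2.getD (pos_lsd x) 0)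
    (fun (d : PySem.Dict Int Int) x => d.insert (pos_lsd x) (d.getD (pos_lsd x) 0 + 1))
    l 0 PySem.Dict.empty
  simp only [pos_lsd] at h
  rw [h]
  have hm : l.foldl (fun (d : PySem.Dict Int Int) x =>
        d.insert (((PySem.List.slice (pyBin x) (some 2) none).length : Int))
          (d.getD (((PySem.List.slice (pyBin x) (some 2) none).length : Int)) 0 + 1))
        PySem.Dict.empty
      = (l.map pos_lsd).foldl (fun d k => d.insert k (d.getD k 0 + 1)) PySem.Dict.empty := by
    rw [List.foldl_map]
    rfl
  rw [hm, PySem.Dict.getD_foldl_insert_add_one, PySem.Dict.getD_empty]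
  simp

theorem solution_alt_eq_pairSum (arr : List Int) :
    solution_alt arr = pairSum (arr.map pos_lsd) := by
  unfold solution_alt
  induction arr using List.reverseRecOn with
  | nil => simp [pairSum_nil]
  | append_singleton l x ih =>
    rw [List.foldl_append]
    simp only [List.foldl_cons, List.foldl_nil]
    rw [solution_alt_counter l]
    simp only [List.map_append, List.map_cons, List.map_nil]
    rw [pairSum_append_singleton]
    rw [← ih]
    rfl

-- ===== VERDICT (by name: the statement is the Claim_ definition above) =====
theorem solution_spec : Claim_equal_solution := by
  intro arr _
  unfold Spec_solution
  rw [solution_eq_pairSum, solution_alt_eq_pairSum]
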